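-- pv_equiv track=rewrite | github.com/zhengye1/paipuconverter | parseTenhou.py | listHandToKobaStr
-- ===== SOURCE A (Python) =====
-- def listHandToKobaStr(hand):
--     kobaDict = {'m': [], 'p': [], 's': [], 'z': []}
--     for num in hand:
--         if type(num) == str and num.isnumeric():
--             num = int(num)
--         # 天凤用51代表红五，52代表红⑤，53代表红5
--         if num > 50:
--             shu = 0
--             pai = num % 10
--         else:
--             shu = num % 10
--             pai = num // 10
--         if pai == 1:
--             kobaDict['m'].append(str(shu))
--         if pai == 2:
--             kobaDict['p'].append(str(shu))
--         if pai == 3: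
--             kobaDict['s'].append(str(shu))
--         if pai == 4:
--             kobaDict['z'].append(str(shu))
--     kobaHand = ''
--     for key, value in kobaDict.items():
--         if value:
--             value.sort()
--             kobaHand += (key + ''.join(value))
--
--     return kobaHand
-- ===== SOURCE B (Python) =====
-- def listHandToKobaStr(hand):
--     # counting sort: one pass builds per-suit digit-count tables, then emit 0..9
--     counts = {'m': [0] * 10, 'p': [0] * 10, 's': [0] * 10, 'z': [0] * 10}
--     suits = {1: 'm', 2: 'p', 3: 's', 4: 'z'}
--     for num in hand:
--         if type(num) == str and num.isnumeric():
--             num = int(num)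
--         if num > 50:
--             shu, pai = 0, num % 10
--         else:
--             shu, pai = num % 10, num // 10
--         suit = suits.get(pai)
--         if suit is not None:
--             counts[suit][shu] += 1
--     out = ''
--     for suit, c in counts.items():
--         if any(c):
--             out += suit + ''.join(str(d) * n for d, n in enumerate(c))
--     return out
-- ===== Notes on version B (the rewrite author's own statement) =====
-- stated objective: alternative
-- what changed: A appends digit characters to four per-suit lists and comparison-sorts each before joining; B maintains per-suit count tables indexed by digit 0-9 during the single pass and emits each suit by counting sort (digits 0..9 repeated by their counts), removing the sort entirely.
import Mathlib
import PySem

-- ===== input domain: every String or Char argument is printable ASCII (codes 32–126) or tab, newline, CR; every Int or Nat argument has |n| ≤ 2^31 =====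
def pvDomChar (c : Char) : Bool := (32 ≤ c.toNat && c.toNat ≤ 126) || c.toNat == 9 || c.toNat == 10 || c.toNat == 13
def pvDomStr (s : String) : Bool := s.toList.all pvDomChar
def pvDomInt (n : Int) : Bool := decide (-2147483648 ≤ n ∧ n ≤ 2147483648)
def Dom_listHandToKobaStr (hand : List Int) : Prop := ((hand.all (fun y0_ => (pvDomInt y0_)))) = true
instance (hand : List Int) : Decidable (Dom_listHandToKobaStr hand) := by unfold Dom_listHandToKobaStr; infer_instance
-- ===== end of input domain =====

-- B replaces A's append-then-comparison-sort with per-suit digit-count tables (counting sort); return value only (A sorts its lists in place, B does not mutate).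

-- Both Pythons compute shu/pai by the same two lines; shared helpers for that conversion.
-- (The Python 'type(num) == str' branch can never fire: the argument is a list of ints.)
def pvShu (num : Int) : Int := if num > 50 then 0 else PySem.Int.mod num 10
def pvPai (num : Int) : Int := if num > 50 then PySem.Int.mod num 10 else PySem.Int.floordiv num 10

-- ===== PORT A =====
structure AKoba where
  m : List String
  p : List String
  s : List String
  z : List String

def aStep (acc : AKoba) (num : Int) : AKoba :=
  let shu := pvShu num
  let pai := pvPai num
  let acc := if pai = 1 then { acc with m := acc.m ++ [PySem.Int.toStr shu] } else acc
  let acc := if pai = 2 then { acc with p := acc.p ++ [PySem.Int.toStr shu] } else acc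
  let acc := if pai = 3 then { acc with s := acc.s ++ [PySem.Int.toStr shu] } else acc
  if pai = 4 then { acc with z := acc.z ++ [PySem.Int.toStr shu] } else acc

-- one iteration of A's output loop: if value: value.sort(); kobaHand += key + ''.join(value)
def aEmit (key : String) (value : List String) : String :=
  if value ≠ [] then key ++ PySem.Str.join "" (PySem.List.sorted value (fun x => x)) else ""

def listHandToKobaStr (hand : List Int) : String :=
  let d := hand.foldl aStep ⟨[], [], [], []⟩
  aEmit "m" d.m ++ aEmit "p" d.p ++ aEmit "s" d.s ++ aEmit "z" d.z

-- ===== PORT B =====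
structure BCounts where
  m : List Int
  p : List Int
  s : List Int
  z : List Int

-- c[shu] += 1  (at every call site 0 ≤ shu < 10 = len c, so the read and the write are exact)
def bBump (c : List Int) (shu : Int) : List Int :=
  c.set shu.toNat (PySem.List.pyGetD c shu 0 + 1)

-- suits.get(pai) dispatch, ported as the case split over the dict's four keys
def bStep (c : BCounts) (num : Int) : BCounts :=
  let shu := pvShu num
  let pai := pvPai num
  if pai = 1 then { c with m := bBump c.m shu }
  else if pai = 2 then { c with p := bBump c.p shu }
  else if pai = 3 then { c with s := bBump c.s shu }
  else if pai = 4 then { c with z := bBump c.z shu }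
  else c

-- Python's  s * n  on strings (n ≤ 0 gives ""); exact
def strMul (s : String) (n : Int) : String :=
  String.ofList ((List.replicate n.toNat s.toList).flatten)

-- one iteration of B's output loop: if any(c): out += suit + ''.join(str(d) * n for d, n in enumerate(c))
def bEmit (suit : String) (c : List Int) : String :=
  if c.any (fun x => x != 0) then
    suit ++ PySem.Str.join "" ((PySem.List.enumerate c).map (fun dn => strMul (PySem.Int.toStr dn.1) dn.2))
  else ""

def listHandToKobaStr_alt (hand : List Int) : String :=
  let cs := hand.foldl bStep ⟨List.replicate 10 0, List.replicate 10 0, List.replicate 10 0, List.replicate 10 0⟩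
  bEmit "m" cs.m ++ bEmit "p" cs.p ++ bEmit "s" cs.s ++ bEmit "z" cs.z

-- ===== PRECONDITION & SPEC =====
def Spec_listHandToKobaStr (hand : List Int) (out : String) : Prop := out = listHandToKobaStr_alt hand
instance (hand : List Int) (out : String) : Decidable (Spec_listHandToKobaStr hand out) := by unfold Spec_listHandToKobaStr; infer_instance

-- ===== CLAIM (what is proved, stated in full; the proofs are below) =====
def Claim_equal_listHandToKobaStr : Prop := ∀ (hand : List Int), Dom_listHandToKobaStr hand → Spec_listHandToKobaStr hand (listHandToKobaStr hand)

-- ===== LEMMAS AND PROOFS =====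

-- shus, in traversal order, of the tiles that land in suit `s`
def digitsFor (s : Int) (hand : List Int) : List Int :=
  (hand.filter (fun n => pvPai n == s)).map pvShu

lemma shu_bounds (num : Int) : 0 ≤ pvShu num ∧ pvShu num < 10 := by
  unfold pvShu
  split_ifs
  · omega
  · exact ⟨PySem.Int.mod_nonneg _ (by norm_num), PySem.Int.mod_lt _ (by norm_num)⟩

lemma digits_bounds (s : Int) (hand : List Int) :
    ∀ x ∈ digitsFor s hand, 0 ≤ x ∧ x < 10 := by
  intro x hx
  simp only [digitsFor, List.mem_map] at hx
  obtain ⟨n, _, rfl⟩ := hx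
  exact shu_bounds n

-- A's loop: each suit list is the digit strings of that suit, in traversal order
lemma aFold (hand : List Int) (acc : AKoba) :
    hand.foldl aStep acc =
      ⟨acc.m ++ (digitsFor 1 hand).map PySem.Int.toStr,
       acc.p ++ (digitsFor 2 hand).map PySem.Int.toStr,
       acc.s ++ (digitsFor 3 hand).map PySem.Int.toStr,
       acc.z ++ (digitsFor 4 hand).map PySem.Int.toStr⟩ := by
  induction hand generalizing acc with
  | nil => simp [digitsFor]
  | cons num t ih =>
    simp only [List.foldl_cons, ih, digitsFor, List.filter_cons]
    unfold aStep
    by_cases h1 : pvPai num = 1 <;> by_cases h2 : pvPai num = 2 <;>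
      by_cases h3 : pvPai num = 3 <;> by_cases h4 : pvPai num = 4 <;>
      simp_all

-- a count table after one bump, as a map over range 10
lemma bump_map_range (f : Nat → Int) (shu : Int) (h0 : 0 ≤ shu) (h10 : shu < 10) :
    bBump ((List.range 10).map f) shu =
      (List.range 10).map (fun (d : Nat) => if (d : Int) = shu then f d + 1 else f d) := by
  unfold bBump
  rw [PySem.List.pyGetD_of_nonneg _ _ h0,
      PySem.List.getD_map_range f 10 shu.toNat 0 (by omega)]
  apply List.ext_getElem
  · simp
  · intro i h1 h2
    simp only [List.getElem_set, List.getElem_map, List.getElem_range]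
    simp at h2
    split_ifs with ha hb hb
    · rw [ha]
    · exfalso; omega
    · exfalso; omega
    · rfl

def gIf (s : Int) (num : Int) (f : Nat → Int) : Nat → Int :=
  fun d => if pvPai num = s ∧ (d : Int) = pvShu num then f d + 1 else f d

lemma bStep_map (num : Int) (f1 f2 f3 f4 : Nat → Int) :
    bStep ⟨(List.range 10).map f1, (List.range 10).map f2,
           (List.range 10).map f3, (List.range 10).map f4⟩ num =
      ⟨(List.range 10).map (gIf 1 num f1), (List.range 10).map (gIf 2 num f2),
       (List.range 10).map (gIf 3 num f3), (List.range 10).map (gIf 4 num f4)⟩ := by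
  obtain ⟨hs0, hs10⟩ := shu_bounds num
  unfold bStep
  dsimp only
  split_ifs with h1 h2 h3 h4 <;>
    simp only [BCounts.mk.injEq] <;>
    refine ⟨?_, ?_, ?_, ?_⟩ <;>
    (try rw [bump_map_range _ _ hs0 hs10]) <;>
    apply List.map_congr_left <;>
    intro d hd <;>
    simp only [gIf] <;>
    split_ifs <;> simp_all <;> omega

-- B's loop: each count table holds, per digit, the count of that digit in the suit's digit list
lemma bFold (hand : List Int) (f1 f2 f3 f4 : Nat → Int) :
    hand.foldl bStep ⟨(List.range 10).map f1, (List.range 10).map f2,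
                      (List.range 10).map f3, (List.range 10).map f4⟩ =
      ⟨(List.range 10).map (fun (d : Nat) => f1 d + ((digitsFor 1 hand).count (d : Int) : Int)),
       (List.range 10).map (fun (d : Nat) => f2 d + ((digitsFor 2 hand).count (d : Int) : Int)),
       (List.range 10).map (fun (d : Nat) => f3 d + ((digitsFor 3 hand).count (d : Int) : Int)),
       (List.range 10).map (fun (d : Nat) => f4 d + ((digitsFor 4 hand).count (d : Int) : Int))⟩ := by
  induction hand generalizing f1 f2 f3 f4 with
  | nil => simp [digitsFor]
  | cons num t ih =>
    have hcnt : ∀ (s : Int) (d : Nat),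
        ((digitsFor s (num :: t)).count (d : Int) : Int) =
          ((digitsFor s t).count (d : Int) : Int) +
            (if pvPai num = s ∧ (d : Int) = pvShu num then 1 else 0) := by
      intro s d
      by_cases hs : pvPai num = s
      · simp [digitsFor, List.filter_cons, hs, List.count_cons, beq_iff_eq]
        split_ifs <;> simp_all <;> omega
      · simp [digitsFor, List.filter_cons, hs]
    rw [List.foldl_cons, bStep_map, ih]
    simp only [BCounts.mk.injEq]
    refine ⟨?_, ?_, ?_, ?_⟩ <;>
      apply List.map_congr_left <;>
      intro d hd <;>
      simp only [gIf] <;>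
      rw [hcnt] <;>
      split_ifs <;> omega

-- inserting one element at block j of a flatMap over range n is a Perm-cons
lemma flatMap_cons_at {α : Type} (g : Nat → List α) (a : α) (j n : Nat) (hj : j < n) :
    ((List.range n).flatMap (fun (i : Nat) => if i = j then a :: g i else g i)).Perm
      (a :: (List.range n).flatMap g) := by
  induction n with
  | zero => omega
  | succ n ih =>
    rw [List.range_succ, List.flatMap_append, List.flatMap_append]
    by_cases h : j = n
    · subst h
      have he : (List.range j).flatMap (fun (i : Nat) => if i = j then a :: g i else g i)
          = (List.range j).flatMap g := by
        apply List.flatMap_congr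
        intro x hx
        simp at hx
        simp [Nat.ne_of_lt hx]
      rw [he]
      simp only [List.flatMap_cons, List.flatMap_nil, if_pos rfl, List.append_nil]
      exact List.perm_middle
    · have hjn : j < n := by omega
      have : ([n].flatMap (fun (i : Nat) => if i = j then a :: g i else g i)) = [n].flatMap g := by
        simp only [List.flatMap_cons, List.flatMap_nil, if_neg (Ne.symm h)]
      rw [this]
      exact (ih hjn).append_right _

-- counting-sort shape: the digit blocks are a permutation of the input's image
lemma perm_blocks {α : Type} (f : Nat → α) (n : Nat) (L : List Int)
    (hb : ∀ x ∈ L, 0 ≤ x ∧ x < (n : Int)) :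
    ((List.range n).flatMap (fun (d : Nat) => List.replicate (L.count (d : Int)) (f d))).Perm
      (L.map (fun x => f x.toNat)) := by
  induction L with
  | nil => simp
  | cons x t ih =>
    obtain ⟨hx0, hxn⟩ := hb x (by simp)
    have ht := ih (fun y hy => hb y (by simp [hy]))
    have hstep : (fun (d : Nat) => List.replicate ((x :: t).count (d : Int)) (f d))
        = fun (d : Nat) => if d = x.toNat then f x.toNat :: List.replicate (t.count (d : Int)) (f d)
            else List.replicate (t.count (d : Int)) (f d) := by
      funext d
      by_cases hdx : d = x.toNat
      · have : (d : Int) = x := by omega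
        simp [hdx, this, List.replicate_succ, hx0]
      · have h2 : ¬ x = (d : Int) := by omega
        simp [hdx, h2]
    rw [hstep, List.map_cons]
    exact (flatMap_cons_at _ _ _ _ (by omega)).trans (ht.cons _)

lemma pairwise_blocks {α : Type} [Preorder α] (f : Nat → α) (c : Nat → Nat) (n : Nat)
    (hm : ∀ d e, d < n → e < n → d ≤ e → f d ≤ f e) :
    ((List.range n).flatMap (fun (d : Nat) => List.replicate (c d) (f d))).Pairwise (· ≤ ·) := by
  induction n with
  | zero => simp
  | succ n ih =>
    rw [List.range_succ, List.flatMap_append]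
    rw [List.pairwise_append]
    refine ⟨ih (fun d e hd he hde => hm d e (by omega) (by omega) hde), ?_, ?_⟩
    · simp only [List.flatMap_cons, List.flatMap_nil, List.append_nil]
      exact List.pairwise_replicate.mpr (Or.inr le_rfl)
    · intro a ha b hb
      simp only [List.mem_flatMap, List.mem_range] at ha
      obtain ⟨d, hd, hda⟩ := ha
      simp only [List.flatMap_cons, List.flatMap_nil, List.append_nil] at hb
      rw [List.eq_of_mem_replicate hda, List.eq_of_mem_replicate hb]
      exact hm d n (by omega) (by omega) (by omega)

lemma toStr_digit_mono : ∀ d < 10, ∀ e < 10, d ≤ e →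
    PySem.Int.toStr (d : Nat) ≤ PySem.Int.toStr (e : Nat) := by
  intro d hd e he hde
  rw [String.le_iff_toList_le]
  revert hde; revert e he; revert d hd
  decide

-- the sorted suit list IS the 0..9 block concatenation
lemma sorted_digits (L : List Int) (hb : ∀ x ∈ L, 0 ≤ x ∧ x < 10) :
    PySem.List.sorted (L.map PySem.Int.toStr) (fun x => x) =
      (List.range 10).flatMap
        (fun (d : Nat) => List.replicate (L.count (d : Int)) (PySem.Int.toStr (d : Nat))) := by
  apply PySem.List.sorted_id_eq_of_perm_of_pairwise
  · have h := perm_blocks (fun (d : Nat) => PySem.Int.toStr (d : Nat)) 10 L hb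
    have hmap : L.map (fun x => PySem.Int.toStr ((x.toNat : Nat) : Int)) = L.map PySem.Int.toStr := by
      apply List.map_congr_left
      intro x hx
      have := (hb x hx).1
      congr 1
      omega
    rw [hmap] at h
    exact h
  · exact pairwise_blocks _ _ 10 (fun d e hd he hde => toStr_digit_mono d hd e he hde)

lemma join_nil_flatten (l : List (List Char)) : PySem.Chars.join [] l = l.flatten := by
  induction l with
  | nil => exact PySem.Chars.join_nil []
  | cons x t ih =>
    cases t with
    | nil => simp [PySem.Chars.join_singleton]
    | cons y u =>
      rw [PySem.Chars.join_cons_cons, ih, List.flatten_cons]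
      simp

lemma flatten_flatMap' {α β : Type} (l : List α) (f : α → List (List β)) :
    (l.flatMap f).flatten = l.flatMap (fun a => (f a).flatten) := by
  induction l with | nil => rfl | cons x t ih => simp [ih]

lemma enumerate_map_range {α : Type} (n : Nat) (f : Nat → α) (s : Int) :
    PySem.List.enumerate ((List.range n).map f) s =
      (List.range n).map (fun (d : Nat) => (s + (d : Int), f d)) := by
  induction n generalizing s with
  | zero => simp [PySem.List.enumerate_nil]
  | succ n ih =>
    rw [List.range_succ, List.map_append, PySem.List.enumerate_append, ih, List.map_append]
    simp [PySem.List.enumerate_cons, PySem.List.enumerate_nil]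

-- per-suit: A's emitted piece = B's emitted piece
lemma emit_eq (key : String) (L : List Int) (hb : ∀ x ∈ L, 0 ≤ x ∧ x < 10) :
    aEmit key (L.map PySem.Int.toStr) =
      bEmit key ((List.range 10).map (fun (d : Nat) => ((L.count (d : Int) : Nat) : Int))) := by
  unfold aEmit bEmit
  have hcond : (L.map PySem.Int.toStr ≠ []) ↔
      (((List.range 10).map (fun (d : Nat) => ((L.count (d : Int) : Nat) : Int))).any (fun x => x != 0) = true) := by
    simp only [List.any_map, List.any_eq_true, List.mem_range, Function.comp, bne_iff_ne, ne_eq,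
      Nat.cast_eq_zero, List.count_eq_zero, List.map_eq_nil_iff]
    constructor
    · intro h
      cases L with
      | nil => simp at h
      | cons y t =>
        obtain ⟨hy0, hy10⟩ := hb y (by simp)
        refine ⟨y.toNat, by omega, ?_⟩
        have hyy : ((y.toNat : Nat) : Int) = y := by omega
        simp [hyy]
    · rintro ⟨d, hd, hmem⟩
      intro hnil
      subst hnil
      simp at hmem
  by_cases h : L.map PySem.Int.toStr = []
  · rw [if_neg (by simp [h]), if_neg (by rw [← hcond]; simp [h])]
  · rw [if_pos h, if_pos (hcond.mp h)]
    congr 1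
    rw [← String.toList_inj]
    rw [PySem.Str.toList_join, PySem.Str.toList_join]
    have hnil : ("" : String).toList = [] := rfl
    rw [hnil, join_nil_flatten, join_nil_flatten]
    rw [sorted_digits L hb, enumerate_map_range]
    rw [List.map_flatMap]
    rw [flatten_flatMap']
    simp only [List.map_map]
    refine congrArg List.flatten (List.map_congr_left ?_)
    intro d hd
    simp [strMul]

-- ===== VERDICT (by name: the statement is the Claim_ definition above) =====
theorem listHandToKobaStr_spec : Claim_equal_listHandToKobaStr := by
  intro hand _
  unfold Spec_listHandToKobaStr listHandToKobaStr listHandToKobaStr_alt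
  have hrep : (List.replicate 10 (0:Int)) = (List.range 10).map (fun _ => (0:Int)) := by decide
  rw [aFold, hrep, bFold]
  simp only [List.nil_append, zero_add]
  rw [emit_eq "m" _ (digits_bounds 1 hand), emit_eq "p" _ (digits_bounds 2 hand),
      emit_eq "s" _ (digits_bounds 3 hand), emit_eq "z" _ (digits_bounds 4 hand)]
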